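-- pv_equiv track=rewrite | github.com/michaelhodel/curriculum-based-ensembling | preprocessing.py | reconstruct_smileys
-- ===== SOURCE A (Python) =====
-- from typing import Tuple
--
-- def reconstruct_smileys(
--     tweets: Tuple[str],
-- ) -> Tuple[str]:
--     """
--     attempts to reconstruct smileys like ":))" or ":(("
--
--     :param tweets: tweets
--     :return: tweets with assumed smileys reconstructed
--     """
--     falsealarm_ids = [
--         '<user>', '<url>', 'live at <url>', 'via <user>', 'rt <user>'
--     ]
--     falsealarm_ids = [f'( {s}' for s in falsealarm_ids]
--     tweets_reconstructed = []
--     for tweet in tweets: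
--         if tweet.count('(') != tweet.count(')'):
--             while ') )' in tweet:
--                 tweet = tweet.replace(') )', ')')
--             while '( (' in tweet:
--                 tweet = tweet.replace('( (', '(')
--             if tweet.count('(') > tweet.count(')'):
--                 falsealarm = False
--                 for falsealarm_id in falsealarm_ids:
--                     if falsealarm_id in tweet:
--                         falsealarm = True
--                         break
--                 if falsealarm:
--                     tweets_reconstructed.append(tweet)
--                 else:
--                     tweets_reconstructed.append(tweet.replace('(', ':('))
--             elif '(' not in tweet and ')' in tweet:
--                 tweets_reconstructed.append(tweet.replace(')', ':)'))
--             else: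
--                 tweets_reconstructed.append(tweet)
--         else:
--             tweets_reconstructed.append(tweet)
--     return tuple(tweets_reconstructed)
-- ===== SOURCE B (Python) =====
-- from typing import Tuple
--
-- _FALSEALARM_IDS = ['<user>', '<url>', 'live at <url>', 'via <user>', 'rt <user>']
--
--
-- def _collapse_runs(s: str, c: str) -> str:
--     # one left-to-right scan: a run like "c c c" (single spaces) becomes a single c
--     out = []
--     i, n = 0, len(s)
--     while i < n:
--         out.append(s[i])
--         if s[i] == c:
--             i += 1
--             while i + 1 < n and s[i] == ' ' and s[i + 1] == c:
--                 i += 2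
--         else:
--             i += 1
--     return ''.join(out)
--
--
-- def _fix_tweet(tweet: str) -> str:
--     if tweet.count('(') == tweet.count(')'):
--         return tweet
--     t = _collapse_runs(_collapse_runs(tweet, ')'), '(')
--     op, cl = t.count('('), t.count(')')
--     if op > cl:
--         if any('( ' + s in t for s in _FALSEALARM_IDS):
--             return t
--         return t.replace('(', ':(')
--     if op == 0 and cl > 0:
--         return t.replace(')', ':)')
--     return t
--
--
-- def reconstruct_smileys(
--     tweets: Tuple[str],
-- ) -> Tuple[str]:
--     return tuple(_fix_tweet(tweet) for tweet in tweets)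
-- ===== Notes on version B (the rewrite author's own statement) =====
-- stated objective: alternative
-- what changed: Each tweet's space-separated runs of ')' (and of '(') are collapsed by a single left-to-right scan per character instead of A's whole-string str.replace passes iterated to a fixed point, and the result tuple is built by a comprehension over a per-tweet helper instead of an accumulator loop.
import Mathlib
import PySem

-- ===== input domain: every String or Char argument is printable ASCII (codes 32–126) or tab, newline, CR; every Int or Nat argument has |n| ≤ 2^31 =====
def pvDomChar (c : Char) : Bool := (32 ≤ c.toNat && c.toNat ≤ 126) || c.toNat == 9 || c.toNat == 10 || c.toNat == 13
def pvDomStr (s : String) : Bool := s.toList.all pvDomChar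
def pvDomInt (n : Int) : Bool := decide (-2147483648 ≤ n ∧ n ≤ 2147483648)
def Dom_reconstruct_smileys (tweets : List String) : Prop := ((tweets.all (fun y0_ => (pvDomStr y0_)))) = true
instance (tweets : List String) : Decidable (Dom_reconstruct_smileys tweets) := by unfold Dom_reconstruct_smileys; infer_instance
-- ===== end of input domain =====

-- B collapses each space-separated run of identical parens by a single left-to-right scan
-- instead of A's iterated global str.replace loops; same return value, objective: alternative.

-- ===== PORT A =====
-- termination lemmas for the 'while pat in tweet: tweet = tweet.replace(pat, rep)' loops
theorem pvGoLenLe (c : Char) : ∀ (fuel : Nat) (l acc : List Char), l.length ≤ fuel →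
    (PySem.Chars.replace.go [c, ' ', c] [c] fuel l acc).length ≤ acc.length + l.length := by
  intro fuel
  induction fuel with
  | zero =>
    intro l acc h
    have : l = [] := List.eq_nil_of_length_eq_zero (Nat.le_zero.mp h)
    subst this
    simp [PySem.Chars.replace.go]
  | succ n ih =>
    intro l acc h
    match l with
    | [] => simp [PySem.Chars.replace.go]
    | a :: t =>
      rw [PySem.Chars.replace.go]
      by_cases hp : [c, ' ', c].isPrefixOf (a :: t) = true
      · simp only [hp, if_pos]
        have hsh : ∃ t', a :: t = c :: ' ' :: c :: t' := by
          match t with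
          | b :: d :: t' =>
            simp [List.isPrefixOf] at hp
            exact ⟨t', by obtain ⟨h1, h2, h3⟩ := hp; rw [← h1, ← h2, ← h3]⟩
          | [] => simp [List.isPrefixOf] at hp
          | [b] => simp [List.isPrefixOf] at hp
        obtain ⟨t', ht'⟩ := hsh
        have hlen : ((a :: t).drop 3).length ≤ n := by
          simp at h ⊢; omega
        have := ih ((a :: t).drop 3) ([c].reverse ++ acc) hlen
        rw [ht'] at this ⊢
        simp at this ⊢
        omega
      · simp only [hp, if_neg, Bool.not_eq_true]
        have hlen : t.length ≤ n := by simp at h; omega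
        have := ih t (a :: acc) hlen
        simp at this ⊢
        omega

theorem pvGoLenLt (c : Char) : ∀ (fuel : Nat) (l acc : List Char), l.length ≤ fuel →
    [c, ' ', c] <:+: l →
    (PySem.Chars.replace.go [c, ' ', c] [c] fuel l acc).length < acc.length + l.length := by
  intro fuel
  induction fuel with
  | zero =>
    intro l acc h hinf
    have : l = [] := List.eq_nil_of_length_eq_zero (Nat.le_zero.mp h)
    subst this
    simp at hinf
  | succ n ih =>
    intro l acc h hinf
    match l with
    | [] => simp at hinf
    | a :: t =>
      rw [PySem.Chars.replace.go]
      by_cases hp : [c, ' ', c].isPrefixOf (a :: t) = true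
      · simp only [hp, if_pos]
        have hsh : ∃ t', a :: t = c :: ' ' :: c :: t' := by
          match t with
          | b :: d :: t' =>
            simp [List.isPrefixOf] at hp
            exact ⟨t', by obtain ⟨h1, h2, h3⟩ := hp; rw [← h1, ← h2, ← h3]⟩
          | [] => simp [List.isPrefixOf] at hp
          | [b] => simp [List.isPrefixOf] at hp
        obtain ⟨t', ht'⟩ := hsh
        have hlen : ((a :: t).drop 3).length ≤ n := by simp at h ⊢; omega
        have := pvGoLenLe c n ((a :: t).drop 3) ([c].reverse ++ acc) hlen
        rw [ht'] at this ⊢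
        simp at this ⊢
        omega
      · simp only [hp, if_neg, Bool.not_eq_true]
        have hpre : ¬ ([c, ' ', c] <+: (a :: t)) := by
          intro hcontra
          exact hp (List.isPrefixOf_iff_prefix.mpr hcontra)
        have hinf' : [c, ' ', c] <:+: t := by
          rcases List.infix_cons_iff.mp hinf with h1 | h2
          · exact absurd h1 hpre
          · exact h2
        have hlen : t.length ≤ n := by simp at h; omega
        have := ih t (a :: acc) hlen hinf'
        simp at this ⊢
        omega

theorem pvReplaceLenLt (c : Char) (s : List Char) (h : PySem.Chars.isIn [c, ' ', c] s = true) :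
    (PySem.Chars.replace s [c, ' ', c] [c]).length < s.length := by
  have hinf : [c, ' ', c] <:+: s := (PySem.Chars.isIn_iff_infix _ _).mp h
  have := pvGoLenLt c s.length s [] (le_refl _) hinf
  simpa [PySem.Chars.replace] using this

-- 'while pat in tweet: tweet = tweet.replace(pat, rep)' for pat = "c c", rep = "c"
def pvLoop (c : Char) (s : List Char) : List Char :=
  if h : PySem.Chars.isIn [c, ' ', c] s = true then
    pvLoop c (PySem.Chars.replace s [c, ' ', c] [c])
  else s
termination_by s.length
decreasing_by exact pvReplaceLenLt c s h

def pvFalsealarmIds : List String :=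
  (["<user>", "<url>", "live at <url>", "via <user>", "rt <user>"].map (fun s => "( " ++ s))

-- the body of A's 'for tweet in tweets' loop
def pvProcA (tw : List Char) : List Char :=
  if PySem.Chars.count tw ['('] ≠ PySem.Chars.count tw [')'] then
    let t1 := pvLoop ')' tw
    let t2 := pvLoop '(' t1
    if PySem.Chars.count t2 ['('] > PySem.Chars.count t2 [')'] then
      if pvFalsealarmIds.foldl (fun acc fid => acc || PySem.Chars.isIn fid.toList t2) false then t2
      else PySem.Chars.replace t2 ['('] ":(".toList
    else if PySem.Chars.isIn ['('] t2 = false ∧ PySem.Chars.isIn [')'] t2 = true then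
      PySem.Chars.replace t2 [')'] ":)".toList
    else t2
  else tw

def reconstruct_smileys (tweets : List String) : List String :=
  tweets.foldl (fun acc tweet => acc ++ [String.ofList (pvProcA tweet.toList)]) []

-- ===== PORT B =====
-- Source B's inner 'while i+1 < n and s[i] == ' ' and s[i+1] == c: i += 2'
def pvSkip (c : Char) : List Char → List Char
  | a :: b :: t => if a = ' ' ∧ b = c then pvSkip c t else a :: b :: t
  | l => l

theorem pvSkipLenLe (c : Char) : ∀ (l : List Char), (pvSkip c l).length ≤ l.length := by
  intro l
  induction l using pvSkip.induct c with
  | case1 a b t h ih => rw [pvSkip]; simp [h]; omega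
  | case2 a b t h => rw [pvSkip]; simp [h]
  | case3 l h =>
    match l, h with
    | [], _ => simp [pvSkip]
    | [a], _ => simp [pvSkip]
    | a :: b :: t, h => exact absurd rfl (h a b t)

-- Source B's _collapse_runs: one linear pass over s
def pvCollapse (c : Char) : List Char → List Char
  | [] => []
  | a :: t =>
    if a = c then a :: pvCollapse c (pvSkip c t)
    else a :: pvCollapse c t
termination_by l => l.length
decreasing_by
  · exact Nat.lt_succ_of_le (pvSkipLenLe c t)
  · simp

-- Source B's _fix_tweet
def pvProcB (tw : List Char) : List Char :=
  if PySem.Chars.count tw ['('] = PySem.Chars.count tw [')'] then tw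
  else
    let t := pvCollapse '(' (pvCollapse ')' tw)
    let op := PySem.Chars.count t ['(']
    let cl := PySem.Chars.count t [')']
    if cl < op then
      if (["<user>", "<url>", "live at <url>", "via <user>", "rt <user>"].any
          (fun s => PySem.Chars.isIn ("( " ++ s).toList t)) then t
      else PySem.Chars.replace t ['('] ":(".toList
    else if op = 0 ∧ 0 < cl then PySem.Chars.replace t [')'] ":)".toList
    else t

def reconstruct_smileys_alt (tweets : List String) : List String :=
  tweets.map (fun tweet => String.ofList (pvProcB tweet.toList))

-- ===== PRECONDITION & SPEC =====
def Spec_reconstruct_smileys (tweets : List String) (out : List String) : Prop := out = reconstruct_smileys_alt tweets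
instance (tweets : List String) (out : List String) : Decidable (Spec_reconstruct_smileys tweets out) := by unfold Spec_reconstruct_smileys; infer_instance

-- ===== CLAIM (what is proved, stated in full; the proofs are below) =====
def Claim_equal_reconstruct_smileys : Prop := ∀ (tweets : List String), Dom_reconstruct_smileys tweets → Spec_reconstruct_smileys tweets (reconstruct_smileys tweets)

-- ===== LEMMAS AND PROOFS =====


theorem pvSkipNe (c a : Char) (t : List Char) (ha : a ≠ ' ') : pvSkip c (a :: t) = a :: t := by
  match t with
  | [] => simp [pvSkip]
  | b :: t' => simp [pvSkip, ha]

theorem pvSkipPair (c : Char) (t : List Char) : pvSkip c (' ' :: c :: t) = pvSkip c t := by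
  simp [pvSkip]

theorem pvSkipNePair (c b : Char) (t : List Char) (hb : b ≠ c) : pvSkip c (' ' :: b :: t) = ' ' :: b :: t := by
  simp [pvSkip, hb]

theorem pvCollapseNil (c : Char) : pvCollapse c [] = [] := by rw [pvCollapse]

theorem pvCollapseSelf (c : Char) (t : List Char) :
    pvCollapse c (c :: t) = c :: pvCollapse c (pvSkip c t) := by
  rw [pvCollapse, if_pos rfl]

theorem pvCollapseNe (c a : Char) (t : List Char) (ha : a ≠ c) :
    pvCollapse c (a :: t) = a :: pvCollapse c t := by
  rw [pvCollapse, if_neg ha]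

theorem pvCollapseRw (c : Char) (hc : c ≠ ' ') : ∀ (n : Nat) (u v : List Char), u.length ≤ n →
    (pvCollapse c (u ++ [c, ' ', c] ++ v) = pvCollapse c (u ++ c :: v)) ∧
    (pvCollapse c (pvSkip c (u ++ [c, ' ', c] ++ v)) = pvCollapse c (pvSkip c (u ++ c :: v))) := by
  intro n
  induction n with
  | zero =>
    intro u v hu
    have hu0 : u = [] := List.eq_nil_of_length_eq_zero (Nat.le_zero.mp hu)
    subst hu0
    simp only [List.nil_append, List.cons_append]
    constructor
    · rw [pvCollapseSelf, pvCollapseSelf, pvSkipPair]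
    · rw [pvSkipNe c c _ hc, pvSkipNe c c _ hc,
        pvCollapseSelf, pvCollapseSelf, pvSkipPair]
  | succ n ih =>
    intro u v hu
    have h1 : pvCollapse c (u ++ [c, ' ', c] ++ v) = pvCollapse c (u ++ c :: v) := by
      match u with
      | [] =>
        simp only [List.nil_append, List.cons_append]
        rw [pvCollapseSelf, pvCollapseSelf, pvSkipPair]
      | a :: u' =>
        by_cases ha : a = c
        · subst ha
          simp only [List.cons_append]
          rw [pvCollapseSelf, pvCollapseSelf]
          have := (ih u' v (by simp at hu; omega)).2
          simp only [List.append_assoc] at this ⊢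
          rw [this]
        · simp only [List.cons_append]
          rw [pvCollapseNe c a _ ha, pvCollapseNe c a _ ha]
          have := (ih u' v (by simp at hu; omega)).1
          simp only [List.append_assoc] at this ⊢
          rw [this]
    refine ⟨h1, ?_⟩
    match u with
    | [] =>
      simp only [List.nil_append, List.cons_append] at h1 ⊢
      rw [pvSkipNe c c _ hc, pvSkipNe c c _ hc]
      exact h1
    | [a] =>
      by_cases ha : a = ' '
      · subst ha
        simp only [List.cons_append, List.nil_append]
        rw [pvSkipPair, pvSkipPair]
      · simp only [List.cons_append, List.nil_append] at h1 ⊢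
        rw [pvSkipNe c a _ ha, pvSkipNe c a _ ha]
        exact h1
    | a :: b :: u'' =>
      by_cases ha : a = ' '
      · subst ha
        by_cases hb : b = c
        · subst hb
          simp only [List.cons_append]
          rw [pvSkipPair, pvSkipPair]
          have := (ih u'' v (by simp at hu; omega)).2
          simp only [List.append_assoc] at this ⊢
          exact this
        · simp only [List.cons_append]
          rw [pvSkipNePair c b _ hb, pvSkipNePair c b _ hb]
          simpa using h1
      · simp only [List.cons_append]
        rw [pvSkipNe c a _ ha, pvSkipNe c a _ ha]
        simpa using h1

theorem pvCollapseRwEq (c : Char) (hc : c ≠ ' ') (u v : List Char) :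
    pvCollapse c (u ++ [c, ' ', c] ++ v) = pvCollapse c (u ++ c :: v) :=
  (pvCollapseRw c hc u.length u v le_rfl).1

def pvStep (c : Char) (x y : List Char) : Prop :=
  ∃ u v, x = u ++ [c, ' ', c] ++ v ∧ y = u ++ c :: v

theorem pvStepCollapse {c : Char} (hc : c ≠ ' ') {x y : List Char} (h : pvStep c x y) :
    pvCollapse c x = pvCollapse c y := by
  obtain ⟨u, v, rfl, rfl⟩ := h
  exact pvCollapseRwEq c hc u v

theorem pvRtgCollapse {c : Char} (hc : c ≠ ' ') {x y : List Char}
    (h : Relation.ReflTransGen (pvStep c) x y) : pvCollapse c x = pvCollapse c y := by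
  induction h with
  | refl => rfl
  | tail _ hstep ih => rw [ih, pvStepCollapse hc hstep]

theorem pvRtgCons {c : Char} (a : Char) {x y : List Char}
    (h : Relation.ReflTransGen (pvStep c) x y) :
    Relation.ReflTransGen (pvStep c) (a :: x) (a :: y) := by
  induction h with
  | refl => exact Relation.ReflTransGen.refl
  | tail _ hstep ih =>
    refine Relation.ReflTransGen.tail ih ?_
    obtain ⟨u, v, rfl, rfl⟩ := hstep
    exact ⟨a :: u, v, rfl, rfl⟩

def pvReplA (c : Char) : List Char → List Char
  | [] => []
  | [a] => [a]
  | [a, b] => [a, b]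
  | a :: b :: d :: t =>
    if a = c ∧ b = ' ' ∧ d = c then c :: pvReplA c t
    else a :: pvReplA c (b :: d :: t)
termination_by l => l.length

theorem pvGoSpec (c : Char) : ∀ (fuel : Nat) (l acc : List Char), l.length ≤ fuel →
    PySem.Chars.replace.go [c, ' ', c] [c] fuel l acc = acc.reverse ++ pvReplA c l := by
  intro fuel
  induction fuel with
  | zero =>
    intro l acc h
    have : l = [] := List.eq_nil_of_length_eq_zero (Nat.le_zero.mp h)
    subst this
    simp [PySem.Chars.replace.go, pvReplA]
  | succ n ih =>
    intro l acc h
    match l with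
    | [] => simp [PySem.Chars.replace.go, pvReplA]
    | a :: t =>
      rw [PySem.Chars.replace.go]
      by_cases hp : [c, ' ', c].isPrefixOf (a :: t) = true
      · simp only [hp, if_pos]
        match t, hp with
        | b :: d :: t', hp =>
          simp [List.isPrefixOf] at hp
          obtain ⟨h1, h2, h3⟩ := hp
          subst h1; subst h2; subst h3
          rw [show List.drop [c, ' ', c].length (c :: ' ' :: c :: t') = t' from rfl]
          rw [ih t' ([c].reverse ++ acc) (by simp at h; omega)]
          rw [pvReplA]
          simp
        | [], hp => simp [List.isPrefixOf] at hp
        | [b], hp => simp [List.isPrefixOf] at hp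
      · simp only [hp, if_neg, Bool.not_eq_true]
        rw [ih t (a :: acc) (by simp at h; omega)]
        have hr : pvReplA c (a :: t) = a :: pvReplA c t := by
          match t with
          | [] => rw [pvReplA, pvReplA]
          | [b] => rw [pvReplA, pvReplA]
          | b :: d :: t' =>
            rw [pvReplA]
            rw [if_neg]
            intro hcon
            obtain ⟨h1, h2, h3⟩ := hcon
            subst h1; subst h2; subst h3
            simp [List.isPrefixOf] at hp
        rw [hr]
        simp

theorem pvReplaceEq (c : Char) (s : List Char) :
    PySem.Chars.replace s [c, ' ', c] [c] = pvReplA c s := by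
  have := pvGoSpec c s.length s [] le_rfl
  simpa [PySem.Chars.replace] using this

theorem pvReplARtg (c : Char) : ∀ (s : List Char),
    Relation.ReflTransGen (pvStep c) s (pvReplA c s) := by
  intro s
  induction s using pvReplA.induct c with
  | case1 => rw [pvReplA]
  | case2 a => rw [pvReplA]
  | case3 a b => rw [pvReplA]
  | case4 a b d t hcond ih =>
    obtain ⟨rfl, rfl, rfl⟩ := hcond
    rw [pvReplA, if_pos ⟨rfl, rfl, rfl⟩]
    refine Relation.ReflTransGen.head ?_ (pvRtgCons _ ih)
    exact ⟨[], t, rfl, rfl⟩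
  | case5 a b d t hcond ih =>
    rw [pvReplA, if_neg hcond]
    exact pvRtgCons a ih

theorem pvCollapseNoInfix (c : Char) : ∀ (s : List Char),
    ¬ ([c, ' ', c] <:+: s) → pvCollapse c s = s := by
  intro s
  induction s using pvCollapse.induct c with
  | case1 => intro _; rw [pvCollapse]
  | case2 t ih =>
    intro hni
    have hsk : pvSkip c t = t := by
      match t with
      | [] => rw [pvSkip]; simp
      | [b] => rw [pvSkip]; simp
      | b :: d :: t' =>
        rw [pvSkip, if_neg]
        rintro ⟨hb, hd⟩
        subst hb; subst hd
        exact hni ⟨[], t', rfl⟩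
    rw [hsk] at ih
    have hni' : ¬ ([c, ' ', c] <:+: t) := fun hinf => hni (List.infix_cons_iff.mpr (Or.inr hinf))
    rw [pvCollapseSelf, hsk, ih hni']
  | case3 a t ha ih =>
    intro hni
    have hni' : ¬ ([c, ' ', c] <:+: t) := fun hinf => hni (List.infix_cons_iff.mpr (Or.inr hinf))
    rw [pvCollapseNe c a t ha, ih hni']

theorem pvLoopEq (c : Char) (hc : c ≠ ' ') : ∀ (n : Nat) (s : List Char), s.length ≤ n →
    pvLoop c s = pvCollapse c s := by
  intro n
  induction n with
  | zero =>
    intro s h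
    have hs : s = [] := List.eq_nil_of_length_eq_zero (Nat.le_zero.mp h)
    subst hs
    rw [pvLoop, dif_neg, pvCollapseNil]
    intro hin
    have := (PySem.Chars.isIn_iff_infix _ _).mp hin
    simp at this
  | succ n ih =>
    intro s h
    rw [pvLoop]
    by_cases hin : PySem.Chars.isIn [c, ' ', c] s = true
    · rw [dif_pos hin]
      have hlt := pvReplaceLenLt c s hin
      rw [pvReplaceEq] at hlt ⊢
      rw [ih (pvReplA c s) (by omega)]
      exact (pvRtgCollapse hc (pvReplARtg c s)).symm
    · rw [dif_neg hin]
      exact (pvCollapseNoInfix c s (fun hinf => hin ((PySem.Chars.isIn_iff_infix _ _).mpr hinf))).symm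

theorem pvCountGo (ch : Char) : ∀ (fuel : Nat) (l : List Char) (acc : Nat), l.length ≤ fuel →
    PySem.Chars.count.go [ch] fuel l acc = acc + l.count ch := by
  intro fuel
  induction fuel with
  | zero =>
    intro l acc h
    have hl : l = [] := List.eq_nil_of_length_eq_zero (Nat.le_zero.mp h)
    subst hl
    simp [PySem.Chars.count.go]
  | succ n ih =>
    intro l acc h
    match l with
    | [] => simp [PySem.Chars.count.go]
    | a :: t =>
      rw [PySem.Chars.count.go]
      by_cases hch : ch = a
      · subst hch
        rw [if_pos (by simp [List.isPrefixOf])]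
        rw [show List.drop [ch].length (ch :: t) = t from rfl]
        rw [ih t (acc + 1) (by simp at h; omega)]
        simp
        omega
      · rw [if_neg (by simp [List.isPrefixOf, hch])]
        rw [ih t acc (by simp at h; omega)]
        rw [List.count_cons, if_neg (by simp; exact fun hh => hch hh.symm)]
        omega

theorem pvCountSingle (ch : Char) (l : List Char) : PySem.Chars.count l [ch] = l.count ch := by
  have := pvCountGo ch l.length l 0 le_rfl
  simpa [PySem.Chars.count] using this


theorem pvProcEq (tw : List Char) : pvProcA tw = pvProcB tw := by
  unfold pvProcA pvProcB
  by_cases hcnt : PySem.Chars.count tw ['('] = PySem.Chars.count tw [')']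
  · rw [if_neg (not_not_intro hcnt), if_pos hcnt]
  · rw [if_pos hcnt, if_neg hcnt]
    simp only []
    rw [pvLoopEq ')' (by decide) (tw.length) tw le_rfl]
    rw [pvLoopEq '(' (by decide) ((pvCollapse ')' tw).length) (pvCollapse ')' tw) le_rfl]
    set t := pvCollapse '(' (pvCollapse ')' tw) with ht
    have hfa : pvFalsealarmIds.foldl (fun acc fid => acc || PySem.Chars.isIn fid.toList t) false
        = (["<user>", "<url>", "live at <url>", "via <user>", "rt <user>"].any
            (fun s => PySem.Chars.isIn ("( " ++ s).toList t)) := by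
      simp only [pvFalsealarmIds, List.map, List.foldl, List.any]
      simp [Bool.or_assoc]
    have hiff : (PySem.Chars.isIn ['('] t = false ∧ PySem.Chars.isIn [')'] t = true)
        ↔ (PySem.Chars.count t ['('] = 0 ∧ 0 < PySem.Chars.count t [')']) := by
      rw [PySem.Chars.isIn_eq_false_iff, PySem.Chars.isIn_iff_infix,
        pvCountSingle, pvCountSingle, List.singleton_infix_iff, List.singleton_infix_iff,
        List.count_eq_zero, List.count_pos_iff]
    simp only [gt_iff_lt]
    by_cases hgt : PySem.Chars.count t [')'] < PySem.Chars.count t ['(']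
    · rw [if_pos hgt, if_pos hgt, hfa]
    · rw [if_neg hgt, if_neg hgt, if_congr hiff rfl rfl]

-- ===== VERDICT (by name: the statement is the Claim_ definition above) =====
theorem reconstruct_smileys_spec : Claim_equal_reconstruct_smileys := by
  intro tweets _
  unfold Spec_reconstruct_smileys reconstruct_smileys reconstruct_smileys_alt
  rw [PySem.List.foldl_append_singleton_eq_map]
  exact List.map_congr_left (fun tweet _ => by rw [pvProcEq])
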